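-- pv_equiv track=rewrite | github.com/dgunning/edgartools | edgar/funds/_497k_tables.py | _reorder_class_info_by_html
-- ===== SOURCE A (Python) =====
-- from typing import Dict, List, Optional, Tuple
--
-- def _reorder_class_info_by_html(class_info: List[Dict], html: str) -> List[Dict]:
--     """Reorder class_info to match the order tickers/names appear in the HTML."""
--     if len(class_info) <= 1:
--         return class_info
--
--     # Find the first position of each class's ticker or name in the HTML
--     positions = []
--     for ci in class_info:
--         pos = len(html)  # default to end
--         ticker = ci.get('ticker', '')
--         name = ci.get('name', '')
--         if ticker:
--             idx = html.find(ticker)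
--             if idx >= 0:
--                 pos = min(pos, idx)
--         if name:
--             idx = html.find(name)
--             if idx >= 0:
--                 pos = min(pos, idx)
--         positions.append((pos, ci))
--
--     # Sort by position in HTML
--     positions.sort(key=lambda x: x[0])
--     return [ci for _, ci in positions]
-- ===== SOURCE B (Python) =====
-- from typing import Dict, List
--
-- def _reorder_class_info_by_html(class_info: List[Dict], html: str) -> List[Dict]:
--     """Reorder class_info to match the order tickers/names appear in the HTML.
--
--     Single left-to-right scan of the HTML recording the first occurrence of
--     every distinct ticker/name, then one stable sort keyed by those positions.
--     """
--     # Collect the distinct non-empty patterns, in first-seen order.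
--     patterns = []
--     for ci in class_info:
--         for key in ('ticker', 'name'):
--             v = ci.get(key, '')
--             if v and v not in patterns:
--                 patterns.append(v)
--
--     # One scan of the HTML: first occurrence of each pattern.
--     first = {}
--     remaining = patterns
--     for i in range(len(html)):
--         if not remaining:
--             break
--         found = [p for p in remaining if html.startswith(p, i)]
--         for p in found:
--             first[p] = i
--         remaining = [p for p in remaining if p not in found]
--
--     def pos(ci):
--         best = len(html)
--         for key in ('ticker', 'name'):
--             v = ci.get(key, '')
--             if v:
--                 best = min(best, first.get(v, len(html)))
--         return best
--
--     return sorted(class_info, key=pos)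
-- ===== Notes on version B (the rewrite author's own statement) =====
-- stated objective: alternative
-- what changed: Instead of calling html.find once per ticker/name of every class dict (one full substring scan per pattern) and sorting decorated (pos, dict) pairs, B collects the distinct non-empty patterns once, makes a single left-to-right scan of the HTML recording each pattern's first occurrence in a dict (stopping early when all are found), and then stably sorts class_info with a key function reading those recorded positions.
import Mathlib
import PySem

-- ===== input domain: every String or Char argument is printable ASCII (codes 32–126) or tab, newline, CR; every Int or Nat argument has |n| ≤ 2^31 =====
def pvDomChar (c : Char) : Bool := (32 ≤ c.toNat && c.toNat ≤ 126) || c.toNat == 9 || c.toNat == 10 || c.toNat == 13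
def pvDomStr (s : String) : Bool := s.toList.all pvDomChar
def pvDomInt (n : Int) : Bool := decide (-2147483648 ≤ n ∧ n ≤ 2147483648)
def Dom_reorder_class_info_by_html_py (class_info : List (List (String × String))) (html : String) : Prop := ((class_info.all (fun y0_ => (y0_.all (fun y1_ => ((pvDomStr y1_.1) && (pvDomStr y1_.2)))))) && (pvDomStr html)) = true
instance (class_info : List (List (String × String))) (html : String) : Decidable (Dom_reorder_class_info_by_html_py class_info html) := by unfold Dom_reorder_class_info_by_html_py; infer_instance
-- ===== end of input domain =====

-- B makes a single scan of the HTML recording first occurrences of all distinct patterns,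
-- then sorts class_info by a key function; A calls html.find per pattern per dict.
-- Equivalence of the return values is proved on the whole domain (no Pre_).

-- shared helper: ci.get(key, '') on the association-list dict (first-match lookup)
def pvGet (ci : List (String × String)) (k : String) : String :=
  (PySem.Dict.mk ci).getD k ""

-- ===== PORT A =====
-- the body of A's per-dict loop: pos = min over found ticker/name positions, default len(html)
def pvFindPos (html : String) (ci : List (String × String)) : Int :=
  let pos : Int := (html.toList.length : Int)   -- len(html)
  let ticker := pvGet ci "ticker"
  let name := pvGet ci "name"
  let pos :=
    if ticker ≠ "" then
      let idx := PySem.Str.find html ticker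
      if 0 ≤ idx then min pos idx else pos
    else pos
  let pos :=
    if name ≠ "" then
      let idx := PySem.Str.find html name
      if 0 ≤ idx then min pos idx else pos
    else pos
  pos

def reorder_class_info_by_html_py (class_info : List (List (String × String))) (html : String) : List (List (String × String)) :=
  if class_info.length ≤ 1 then class_info
  else
    let positions := class_info.map (fun ci => (pvFindPos html ci, ci))
    (PySem.List.sorted positions (fun x => x.1) false).map (fun x => x.2)

-- ===== PORT B =====
-- add the two non-empty, not-yet-seen patterns of one dict
def pvAddPats (acc : List String) (ci : List (String × String)) : List String :=
  ["ticker", "name"].foldl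
    (fun acc k =>
      let v := pvGet ci k
      if v ≠ "" ∧ v ∉ acc then acc ++ [v] else acc) acc

-- distinct non-empty tickers/names, in first-seen order
def pvPatterns (class_info : List (List (String × String))) : List String :=
  class_info.foldl pvAddPats []

-- the scan loop: for i in range(len(html)) with early break; html.startswith(p, i) is
-- ported by hand as p.toList.isPrefixOf (h.drop i) — exact for 0 ≤ i ≤ len(html)
def pvScan (h : List Char) : Nat → Nat → List String → PySem.Dict String Int → PySem.Dict String Int
  | 0, _, _, first => first
  | n + 1, i, remaining, first =>
    if remaining = [] then first
    else
      let found := remaining.filter (fun p => p.toList.isPrefixOf (h.drop i))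
      let first' := found.foldl (fun f p => f.insert p (i : Int)) first
      let remaining' := remaining.filter (fun q => !(found.contains q))
      pvScan h n (i + 1) remaining' first'

-- key function: best = min over the dict's non-empty patterns of first.get(v, len(html))
def pvPosB (L : Int) (first : PySem.Dict String Int) (ci : List (String × String)) : Int :=
  ["ticker", "name"].foldl
    (fun best k =>
      let v := pvGet ci k
      if v ≠ "" then min best (first.getD v L) else best) L

def reorder_class_info_by_html_py_alt (class_info : List (List (String × String))) (html : String) : List (List (String × String)) :=
  let h := html.toList
  let patterns := pvPatterns class_info
  let first := pvScan h h.length 0 patterns PySem.Dict.empty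
  PySem.List.sorted class_info (fun ci => pvPosB (h.length : Int) first ci) false

-- ===== PRECONDITION & SPEC =====
def Spec_reorder_class_info_by_html_py (class_info : List (List (String × String))) (html : String) (out : List (List (String × String))) : Prop := out = reorder_class_info_by_html_py_alt class_info html
instance (class_info : List (List (String × String))) (html : String) (out : List (List (String × String))) : Decidable (Spec_reorder_class_info_by_html_py class_info html out) := by unfold Spec_reorder_class_info_by_html_py; infer_instance

-- ===== CLAIM (what is proved, stated in full; the proofs are below) =====
def Claim_equal_reorder_class_info_by_html_py : Prop := ∀ (class_info : List (List (String × String))) (html : String), Dom_reorder_class_info_by_html_py class_info html → Spec_reorder_class_info_by_html_py class_info html (reorder_class_info_by_html_py class_info html)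

-- ===== LEMMAS AND PROOFS =====

-- inserting other keys leaves a lookup unchanged
theorem pv_foldl_insert_get?_of_not_mem (l : List String) (i : Int)
    (f : PySem.Dict String Int) (p : String) (hp : p ∉ l) :
    (l.foldl (fun f q => f.insert q i) f).get? p = f.get? p := by
  induction l generalizing f with
  | nil => rfl
  | cons a t ih =>
    simp only [List.foldl_cons]
    rw [ih _ (by simp_all), PySem.Dict.get?_insert_of_ne _ _ (by simp_all)]

theorem pv_foldl_insert_get?_of_mem (l : List String) (i : Int)
    (f : PySem.Dict String Int) (p : String) (hp : p ∈ l) :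
    (l.foldl (fun f q => f.insert q i) f).get? p = some i := by
  induction l generalizing f with
  | nil => simp at hp
  | cons a t ih =>
    simp only [List.foldl_cons]
    by_cases hpt : p ∈ t
    · exact ih _ hpt
    · have hpa : p = a := by simp_all
      subst hpa
      rw [pv_foldl_insert_get?_of_not_mem _ _ _ _ hpt, PySem.Dict.get?_insert_self]

-- the scan never touches a pattern that is not in `remaining`
theorem pv_scan_get_of_not_mem (h : List Char) :
    ∀ (n i : Nat) (remaining : List String) (first : PySem.Dict String Int) (p : String),
    p ∉ remaining → (pvScan h n i remaining first).get? p = first.get? p := by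
  intro n
  induction n with
  | zero => intro i remaining first p hp; rfl
  | succ n ih =>
    intro i remaining first p hp
    rw [pvScan]
    by_cases hrem : remaining = []
    · simp [hrem]
    · simp only [if_neg hrem]
      rw [ih _ _ _ _ (by
        intro hmem
        exact hp ((List.mem_filter.mp hmem).1)),
        pv_foldl_insert_get?_of_not_mem _ _ _ _ (by
        intro hmem
        exact hp ((List.mem_filter.mp hmem).1))]

-- the scan records, for each pattern still remaining, the first index in [i, i+n) where it occurs
theorem pv_scan_get_of_mem (h : List Char) :
    ∀ (n i : Nat) (remaining : List String) (first : PySem.Dict String Int) (p : String),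
    p ∈ remaining →
    (pvScan h n i remaining first).get? p =
      match (List.range' i n).find? (fun j => p.toList.isPrefixOf (h.drop j)) with
      | some j => some (j : Int)
      | none => first.get? p := by
  intro n
  induction n with
  | zero => intro i remaining first p hp; rfl
  | succ n ih =>
    intro i remaining first p hp
    have hrem : remaining ≠ [] := by rintro rfl; simp at hp
    rw [pvScan]
    simp only [if_neg hrem, List.range'_succ, List.find?_cons]
    by_cases hpb : p.toList.isPrefixOf (h.drop i)
    · have hpf : p ∈ remaining.filter (fun p => p.toList.isPrefixOf (h.drop i)) :=
        List.mem_filter.mpr ⟨hp, hpb⟩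
      rw [pv_scan_get_of_not_mem h _ _ _ _ _ (by
          intro hmem
          have := (List.mem_filter.mp hmem).2
          simp only [List.contains_eq_mem, hpf] at this
          simp at this)]
      rw [pv_foldl_insert_get?_of_mem _ _ _ _ hpf]
      simp [hpb]
    · have hnf : p ∉ remaining.filter (fun p => p.toList.isPrefixOf (h.drop i)) := by
        intro hmem
        exact hpb (List.mem_filter.mp hmem).2
      have hpr : p ∈ remaining.filter
          (fun q => !((remaining.filter (fun p => p.toList.isPrefixOf (h.drop i))).contains q)) := by
        refine List.mem_filter.mpr ⟨hp, ?_⟩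
        simp only [List.contains_eq_mem, Bool.not_eq_eq_eq_not, Bool.not_true]
        simpa using hnf
      rw [ih _ _ _ _ hpr, pv_foldl_insert_get?_of_not_mem _ _ _ _ hnf]
      simp [hpb]

theorem pv_find?_range'_eq_some (pred : Nat → Bool) (j : Nat) :
    ∀ (n i : Nat), i ≤ j → j < i + n → pred j = true → (∀ k < j, pred k = false) →
    (List.range' i n).find? pred = some j := by
  intro n
  induction n with
  | zero => intro i h1 h2; omega
  | succ n ih =>
    intro i h1 h2 hj hmin
    rw [List.range'_succ, List.find?_cons]
    by_cases hij : i = j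
    · subst hij; simp [hj]
    · have : pred i = false := hmin i (by omega)
      simp only [this]
      exact ih (i + 1) (by omega) (by omega) hj hmin

-- the scanned dict agrees with html.find on every recorded pattern
theorem pv_scan_getD (h : List Char) (patterns : List String) (p : String)
    (hp : p ∈ patterns) (hne : p.toList ≠ []) :
    (pvScan h h.length 0 patterns PySem.Dict.empty).getD p (h.length : Int) =
      if PySem.Chars.find h p.toList = -1 then (h.length : Int) else PySem.Chars.find h p.toList := by
  rw [PySem.Dict.getD, pv_scan_get_of_mem h _ _ _ _ _ hp]
  by_cases hfind : PySem.Chars.find h p.toList = -1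
  · have hinf : ¬ p.toList <:+: h := (PySem.Chars.find_eq_neg_one_iff h p.toList).mp hfind
    have hnone : (List.range' 0 h.length).find?
        (fun j => p.toList.isPrefixOf (h.drop j)) = none := by
      rw [List.find?_eq_none]
      intro j _ hpre
      exact hinf (List.IsInfix.trans (List.IsPrefix.isInfix (by simpa using hpre))
        (List.IsSuffix.isInfix (List.drop_suffix j h)))
    simp [hnone, hfind, PySem.Dict.get?_empty]
  · have hge : 0 ≤ PySem.Chars.find h p.toList := by
      have := PySem.Chars.neg_one_le_find (s := h) (sub := p.toList)
      omega
    obtain ⟨hpre, hmin⟩ := PySem.Chars.find_spec hge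
    set j := (PySem.Chars.find h p.toList).toNat with hj
    have hjlt : j < h.length := by
      by_contra hc
      rw [List.drop_eq_nil_of_le (by omega)] at hpre
      exact hne (List.prefix_nil.mp hpre)
    have hsome : (List.range' 0 h.length).find?
        (fun j => p.toList.isPrefixOf (h.drop j)) = some j := by
      apply pv_find?_range'_eq_some _ j h.length 0 (by omega) (by omega)
      · simpa using hpre
      · intro k hk
        rw [Bool.eq_false_iff]
        intro hc
        exact hmin k hk (List.isPrefixOf_iff_prefix.mp hc)
    simp only [hsome, if_neg hfind, Option.getD_some]
    omega

-- one dedup-append step of the pattern collection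
theorem pv_mem_step (acc : List String) (v x : String) :
    x ∈ (if v ≠ "" ∧ v ∉ acc then acc ++ [v] else acc) ↔ x ∈ acc ∨ (x ≠ "" ∧ x = v) := by
  split_ifs with h
  · simp only [List.mem_append, List.mem_singleton]
    constructor
    · rintro (hx | rfl)
      · exact Or.inl hx
      · exact Or.inr ⟨h.1, rfl⟩
    · rintro (hx | ⟨_, rfl⟩)
      · exact Or.inl hx
      · exact Or.inr rfl
  · constructor
    · exact Or.inl
    · rintro (hx | ⟨hne, rfl⟩)
      · exact hx
      · rcases not_and_or.mp h with h' | h'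
        · exact absurd (not_not.mp h') hne
        · exact not_not.mp h'

theorem pv_mem_addPats (acc : List String) (ci : List (String × String)) (x : String) :
    x ∈ pvAddPats acc ci ↔ x ∈ acc ∨ (x ≠ "" ∧ (x = pvGet ci "ticker" ∨ x = pvGet ci "name")) := by
  simp only [pvAddPats, List.foldl_cons, List.foldl_nil]
  rw [pv_mem_step, pv_mem_step]
  tauto

theorem pv_mem_patterns :
    ∀ (l : List (List (String × String))) (acc : List String) (x : String),
    x ∈ List.foldl pvAddPats acc l ↔
      x ∈ acc ∨ ∃ ci ∈ l, x ≠ "" ∧ (x = pvGet ci "ticker" ∨ x = pvGet ci "name") := by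
  intro l
  induction l with
  | nil => simp
  | cons a t ih =>
    intro acc x
    rw [List.foldl_cons, ih, pv_mem_addPats]
    simp only [List.mem_cons]
    constructor
    · rintro ((hx | ⟨hne, hor⟩) | ⟨ci, hci, hprop⟩)
      · exact Or.inl hx
      · exact Or.inr ⟨a, Or.inl rfl, hne, hor⟩
      · exact Or.inr ⟨ci, Or.inr hci, hprop⟩
    · rintro (hx | ⟨ci, (rfl | hci), hprop⟩)
      · exact Or.inl (Or.inl hx)
      · exact Or.inl (Or.inr hprop)
      · exact Or.inr ⟨ci, hci, hprop⟩

-- the two key functions agree on every member of class_info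
theorem pv_pos_eq (class_info : List (List (String × String))) (html : String)
    (ci : List (String × String)) (hci : ci ∈ class_info) :
    pvFindPos html ci =
      pvPosB (html.toList.length : Int)
        (pvScan html.toList html.toList.length 0 (pvPatterns class_info) PySem.Dict.empty) ci := by
  have hmem : ∀ x : String, x ≠ "" →
      (x = pvGet ci "ticker" ∨ x = pvGet ci "name") → x ∈ pvPatterns class_info := by
    intro x hne hor
    exact (pv_mem_patterns class_info [] x).mpr (Or.inr ⟨ci, hci, hne, hor⟩)
  have hgetD : ∀ x : String, x ≠ "" → (x = pvGet ci "ticker" ∨ x = pvGet ci "name") →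
      (pvScan html.toList html.toList.length 0 (pvPatterns class_info)
        PySem.Dict.empty).getD x (html.toList.length : Int) =
      if PySem.Chars.find html.toList x.toList = -1 then (html.toList.length : Int)
      else PySem.Chars.find html.toList x.toList := by
    intro x hne hor
    exact pv_scan_getD html.toList _ x (hmem x hne hor)
      (by intro hc; exact hne (by simpa using hc))
  simp only [pvFindPos, pvPosB, List.foldl_cons, List.foldl_nil, PySem.Str.find_eq]
  by_cases ht : pvGet ci "ticker" = "" <;> by_cases hm : pvGet ci "name" = "" <;>
    simp only [ht, hm, ne_eq, not_true_eq_false, not_false_eq_true, if_true, if_false]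
  · rw [hgetD _ hm (Or.inr rfl)]
    have h1 := PySem.Chars.neg_one_le_find html.toList (pvGet ci "name").toList
    have h2 := PySem.Chars.find_le_length html.toList (pvGet ci "name").toList
    split_ifs <;> omega
  · rw [hgetD _ ht (Or.inl rfl)]
    have h1 := PySem.Chars.neg_one_le_find html.toList (pvGet ci "ticker").toList
    have h2 := PySem.Chars.find_le_length html.toList (pvGet ci "ticker").toList
    split_ifs <;> omega
  · rw [hgetD _ ht (Or.inl rfl), hgetD _ hm (Or.inr rfl)]
    have h1 := PySem.Chars.neg_one_le_find html.toList (pvGet ci "ticker").toList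
    have h2 := PySem.Chars.find_le_length html.toList (pvGet ci "ticker").toList
    have h3 := PySem.Chars.neg_one_le_find html.toList (pvGet ci "name").toList
    have h4 := PySem.Chars.find_le_length html.toList (pvGet ci "name").toList
    split_ifs <;> omega

-- decorate–sort–undecorate equals sort-by-key (same stable insertion sort)
theorem pv_insertBy_map_dec {α : Type} (k : α → Int) (x : α) (acc : List α) :
    PySem.List.insertBy (fun a b => decide (a.1 < b.1)) (k x, x) (acc.map (fun c => (k c, c)))
      = (PySem.List.insertBy (fun a b => decide (k a < k b)) x acc).map (fun c => (k c, c)) := by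
  induction acc with
  | nil => rfl
  | cons y t ih =>
    simp only [List.map_cons, PySem.List.insertBy]
    by_cases hlt : k x < k y
    · simp [hlt]
    · simp [hlt, ih]

theorem pv_sorted_dec {α : Type} (k : α → Int) (xs : List α) :
    PySem.List.sorted (xs.map (fun c => (k c, c))) (fun x => x.1) false
      = (PySem.List.sorted xs k false).map (fun c => (k c, c)) := by
  rw [PySem.List.sorted_eq_foldl_insertBy, PySem.List.sorted_eq_foldl_insertBy]
  have main : ∀ (l acc : List α),
      (l.map (fun c => (k c, c))).foldl
          (fun a y => PySem.List.insertBy (fun a b => decide (a.1 < b.1)) y a)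
          (acc.map (fun c => (k c, c)))
        = (l.foldl (fun a c => PySem.List.insertBy (fun a b => decide (k a < k b)) c a) acc).map
            (fun c => (k c, c)) := by
    intro l
    induction l with
    | nil => intro acc; rfl
    | cons x t ih =>
      intro acc
      simp only [List.map_cons, List.foldl_cons]
      rw [pv_insertBy_map_dec, ih]
  simpa using main xs []

-- ===== VERDICT (by name: the statement is the Claim_ definition above) =====
theorem reorder_class_info_by_html_py_spec : Claim_equal_reorder_class_info_by_html_py := by
  intro class_info html _
  unfold Spec_reorder_class_info_by_html_py
  unfold reorder_class_info_by_html_py reorder_class_info_by_html_py_alt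
  by_cases hlen : class_info.length ≤ 1
  · simp only [if_pos hlen]
    match class_info with
    | [] => rfl
    | [a] => rfl
    | a :: b :: t => simp at hlen
  · simp only [if_neg hlen]
    rw [List.map_congr_left (fun c hc => congrArg (fun p => (p, c)) (pv_pos_eq class_info html c hc)),
      pv_sorted_dec, List.map_map]
    exact List.map_id' _
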